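-- pv_equiv track=rewrite | github.com/pypi-data/pypi-mirror-307 | packages/wetest-snapcode/wetest_snapcode-2.0.262-py3-none-any.whl/flybirds/core/plugin/plugins/default/step/click.py | get_sorted_coordinates
-- ===== SOURCE A (Python) =====
-- def get_sorted_coordinates(coordinates, minDis=50):
--     if len(coordinates) == 1:
--         return coordinates
--
--     coordinates = sorted(coordinates, key=lambda coord: coord[1])
--
--     grouped_coordinates = []
--     current_group = []
--     for coord in coordinates:
--         if len(current_group) == 0:
--             current_group.append(coord)
--         else:
--             if abs(coord[1] - current_group[0][1]) <= minDis:
--                 current_group.append(coord)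
--             else:
--                 grouped_coordinates.append(current_group)
--                 current_group = [coord]
--     grouped_coordinates.append(current_group)
--
--     # 对每个组的坐标按照横坐标进行排序
--     sorted_coordinates = []
--     for group in grouped_coordinates:
--         sorted_group = sorted(group, key=lambda coord: coord[0])
--         sorted_coordinates.extend(sorted_group)
--
--     return sorted_coordinates
-- ===== SOURCE B (Python) =====
-- def get_sorted_coordinates(coordinates, minDis=50):
--     if len(coordinates) == 1:
--         return coordinates
--
--     def emit(rest):
--         # recursively peel off one y-band at a time: the leading maximal run
--         # whose y stays within minDis of the band's first y
--         if not rest: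
--             return []
--         anchor = rest[0][1]
--         group = [rest[0]]
--         tail = rest[1:]
--         while tail and abs(tail[0][1] - anchor) <= minDis:
--             group.append(tail[0])
--             tail = tail[1:]
--         return sorted(group, key=lambda c: c[0]) + emit(tail)
--
--     return emit(sorted(coordinates, key=lambda c: c[1]))
-- ===== Notes on version B (the rewrite author's own statement) =====
-- stated objective: alternative
-- what changed: Instead of A's two staged passes (a foldl-style state machine accumulating explicit group sublists, then a second loop sorting and concatenating them), B recursively peels one y-band at a time off the y-sorted list with a span/takeWhile step and emits each band x-sorted immediately, so no intermediate list of groups is ever built.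
import Mathlib
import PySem

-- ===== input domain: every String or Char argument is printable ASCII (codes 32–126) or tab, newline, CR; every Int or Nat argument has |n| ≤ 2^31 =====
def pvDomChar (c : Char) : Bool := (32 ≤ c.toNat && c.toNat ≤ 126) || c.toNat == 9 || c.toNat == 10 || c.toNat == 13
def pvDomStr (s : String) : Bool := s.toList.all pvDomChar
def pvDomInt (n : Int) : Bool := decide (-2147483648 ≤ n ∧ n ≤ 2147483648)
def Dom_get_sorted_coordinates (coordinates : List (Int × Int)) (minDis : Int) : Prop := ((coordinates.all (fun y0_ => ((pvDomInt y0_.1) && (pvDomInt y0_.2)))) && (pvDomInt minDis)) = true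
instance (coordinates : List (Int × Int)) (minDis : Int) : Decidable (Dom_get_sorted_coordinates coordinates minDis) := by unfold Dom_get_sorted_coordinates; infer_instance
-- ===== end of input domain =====

-- B replaces A's two staged passes (state-machine grouping into explicit sublists, then a
-- second loop sorting each group) by a recursion that peels one y-band at a time off the
-- y-sorted list and emits it x-sorted immediately (objective: alternative decomposition).

-- ===== PORT A =====
-- loop body of A's grouping for-loop, state = (grouped_coordinates, current_group);
-- current_group[0] is only read when current_group is nonempty (guarded by the len==0
-- branch), so it is ported as headI; abs is Int's |·| (exact).
def pvStepA (minDis : Int) (s : List (List (Int × Int)) × List (Int × Int))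
    (coord : Int × Int) : List (List (Int × Int)) × List (Int × Int) :=
  if s.2.length = 0 then (s.1, s.2 ++ [coord])
  else if |coord.2 - s.2.headI.2| ≤ minDis then (s.1, s.2 ++ [coord])
  else (s.1 ++ [s.2], [coord])

def get_sorted_coordinates (coordinates : List (Int × Int)) (minDis : Int) : List (Int × Int) :=
  if coordinates.length = 1 then coordinates
  else
    let cs := PySem.List.sorted coordinates (fun coord => coord.2) false
    let st := cs.foldl (pvStepA minDis) ([], [])
    let grouped := st.1 ++ [st.2]
    grouped.foldl (fun acc group => acc ++ PySem.List.sorted group (fun coord => coord.1) false) []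

-- ===== PORT B =====
-- Source B's inner while loop: starting from (group, tail), move elements of tail whose y is
-- within minDis of anchor onto the end of group; returned as (collected run, leftover tail).
def pvSpanB (minDis anchor : Int) : List (Int × Int) → List (Int × Int) × List (Int × Int)
  | [] => ([], [])
  | c :: cs =>
    if |c.2 - anchor| ≤ minDis then
      let r := pvSpanB minDis anchor cs
      (c :: r.1, r.2)
    else ([], c :: cs)

theorem pvSpanB_tail_le (minDis anchor : Int) (cs : List (Int × Int)) :
    (pvSpanB minDis anchor cs).2.length ≤ cs.length := by
  induction cs with
  | nil => simp [pvSpanB]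
  | cons c cs ih =>
    simp only [pvSpanB]
    split
    · simpa using Nat.le_succ_of_le ih
    · simp

-- Source B's recursive emit: one y-band (rest[0] plus the spanned run) is sorted by x and
-- emitted, then recurse on the leftover tail.
def pvEmitB (minDis : Int) : List (Int × Int) → List (Int × Int)
  | [] => []
  | c :: cs =>
    let r := pvSpanB minDis c.2 cs
    PySem.List.sorted (c :: r.1) (fun coord => coord.1) false ++ pvEmitB minDis r.2
termination_by rest => rest.length
decreasing_by
  simpa using Nat.lt_succ_of_le (pvSpanB_tail_le minDis c.2 cs)

def get_sorted_coordinates_alt (coordinates : List (Int × Int)) (minDis : Int) : List (Int × Int) :=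
  if coordinates.length = 1 then coordinates
  else pvEmitB minDis (PySem.List.sorted coordinates (fun coord => coord.2) false)

-- ===== PRECONDITION & SPEC =====
def Spec_get_sorted_coordinates (coordinates : List (Int × Int)) (minDis : Int) (out : List (Int × Int)) : Prop := out = get_sorted_coordinates_alt coordinates minDis
instance (coordinates : List (Int × Int)) (minDis : Int) (out : List (Int × Int)) : Decidable (Spec_get_sorted_coordinates coordinates minDis out) := by unfold Spec_get_sorted_coordinates; infer_instance

-- ===== CLAIM (what is proved, stated in full; the proofs are below) =====
def Claim_equal_get_sorted_coordinates : Prop := ∀ (coordinates : List (Int × Int)) (minDis : Int), Dom_get_sorted_coordinates coordinates minDis → Spec_get_sorted_coordinates coordinates minDis (get_sorted_coordinates coordinates minDis)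

-- ===== LEMMAS AND PROOFS =====

-- abbreviation for "sort one group by x" used only in the proofs
def pvSortX (g : List (Int × Int)) : List (Int × Int) :=
  PySem.List.sorted g (fun coord => coord.1) false

-- equation lemmas for pvEmitB (its compiled equations are awkward to rewrite with directly)
theorem pvEmitB_nil (minDis : Int) : pvEmitB minDis [] = [] := by
  rw [pvEmitB]

theorem pvEmitB_cons (minDis : Int) (c : Int × Int) (cs : List (Int × Int)) :
    pvEmitB minDis (c :: cs)
      = pvSortX (c :: (pvSpanB minDis c.2 cs).1) ++ pvEmitB minDis (pvSpanB minDis c.2 cs).2 := by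
  rw [pvEmitB]; rfl

-- A's foldl over the remaining input, started from a nonempty current group, produces the
-- same flattened sorted output as "extend the current band by the span, then recurse".
theorem pv_loop (minDis : Int) (cs : List (Int × Int)) :
    ∀ (gs : List (List (Int × Int))) (cg : List (Int × Int)), cg ≠ [] →
    ((cs.foldl (pvStepA minDis) (gs, cg)).1 ++ [(cs.foldl (pvStepA minDis) (gs, cg)).2]).flatMap pvSortX
      = gs.flatMap pvSortX
        ++ pvSortX (cg ++ (pvSpanB minDis cg.headI.2 cs).1)
        ++ pvEmitB minDis (pvSpanB minDis cg.headI.2 cs).2 := by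
  induction cs with
  | nil =>
    intro gs cg hcg
    simp [pvSpanB, pvEmitB_nil, List.flatMap_append]
  | cons c cs ih =>
    intro gs cg hcg
    obtain ⟨a, l, rfl⟩ : ∃ a l, cg = a :: l := by
      cases cg with
      | nil => exact absurd rfl hcg
      | cons a l => exact ⟨a, l, rfl⟩
    simp only [List.foldl_cons, List.headI]
    by_cases hc : |c.2 - a.2| ≤ minDis
    · have hstep : pvStepA minDis (gs, a :: l) c = (gs, (a :: l) ++ [c]) := by
        simp [pvStepA, hc]
      rw [hstep, ih gs ((a :: l) ++ [c]) (by simp)]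
      simp only [List.cons_append, List.headI, pvSpanB, if_pos hc]
      simp [List.append_assoc]
    · have hstep : pvStepA minDis (gs, a :: l) c = (gs ++ [a :: l], [c]) := by
        simp [pvStepA, hc]
      rw [hstep, ih (gs ++ [a :: l]) [c] (by simp)]
      simp only [List.headI, pvSpanB, if_neg hc]
      rw [pvEmitB_cons]
      simp [List.flatMap_append, pvSortX, List.append_assoc]

theorem pv_main (coordinates : List (Int × Int)) (minDis : Int) :
    get_sorted_coordinates coordinates minDis = get_sorted_coordinates_alt coordinates minDis := by
  unfold get_sorted_coordinates get_sorted_coordinates_alt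
  by_cases h1 : coordinates.length = 1
  · simp [h1]
  · simp only [h1, if_false]
    have hfl : ∀ (l : List (List (Int × Int))),
        l.foldl (fun acc group => acc ++ PySem.List.sorted group (fun coord => coord.1) false) []
          = l.flatMap pvSortX := by
      intro l
      simpa [pvSortX] using PySem.List.foldl_append_eq_flatMap
        (g := fun group : List (Int × Int) => PySem.List.sorted group (fun coord => coord.1) false)
        (l := l) (acc := [])
    rcases hcs : PySem.List.sorted coordinates (fun coord => coord.2) false with _ | ⟨c0, rest⟩
    · simp [pvEmitB_nil, PySem.List.sorted]
    · simp only [List.foldl_cons]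
      have hstep0 : pvStepA minDis ([], []) c0 = ([], [c0]) := rfl
      rw [hstep0, hfl, pv_loop minDis rest [] [c0] (by simp)]
      rw [pvEmitB_cons]
      simp [List.headI, pvSortX]

-- ===== VERDICT (by name: the statement is the Claim_ definition above) =====
theorem get_sorted_coordinates_spec : Claim_equal_get_sorted_coordinates := by
  intro coordinates minDis _
  unfold Spec_get_sorted_coordinates
  exact pv_main coordinates minDis
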